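-- pv_equiv track=rewrite | github.com/adamshugar/chromelectric | util.py | find_sequences
-- ===== SOURCE A (Python) =====
-- def find_sequences(nums):
--     """ Given an unordered list of non-negative, unique integers, find all contiguous sequences.
--     Returns the list of sequences as a list of tuples. Assumes valid input list of ints with
--     length greater than zero. LeetCode easy. """
--     nums.sort()
--     prev = nums[0]
--     sequences = [[prev, None]]
--     for n in nums[1:]:
--         if n > prev + 1:
--             sequences[-1][1] = prev
--             sequences.append([n, None])
--         prev = n
--     sequences[-1][1] = nums[-1]
--     return sequences
-- ===== SOURCE B (Python) =====
-- def find_sequences(nums):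
--     # Alternative decomposition: sort in place (same mutation as A), then consume
--     # a stack (reversed copy) with nested pop loops, appending each complete
--     # [start, end] run; no sentinel placeholders or patch-last steps.
--     nums.sort()
--     out = []
--     stack = nums[::-1]
--     while stack:
--         first = stack.pop()
--         prev = first
--         while stack and stack[-1] <= prev + 1:
--             prev = stack.pop()
--         out.append([first, prev])
--     return out
-- ===== Notes on version B (the rewrite author's own statement) =====
-- stated objective: simpler
-- what changed: Replaced A's prev-tracking loop that appends [start, None] placeholders and patches the last slot with stack consumption (reversed sorted list popped by nested loops) that appends each complete [start, end] run; nums is still sorted in place.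
-- crash fix: On the empty list A raises IndexError reading the first element; B returns []. — e.g. on find_sequences([]): A raises IndexError, B returns []
import Mathlib
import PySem

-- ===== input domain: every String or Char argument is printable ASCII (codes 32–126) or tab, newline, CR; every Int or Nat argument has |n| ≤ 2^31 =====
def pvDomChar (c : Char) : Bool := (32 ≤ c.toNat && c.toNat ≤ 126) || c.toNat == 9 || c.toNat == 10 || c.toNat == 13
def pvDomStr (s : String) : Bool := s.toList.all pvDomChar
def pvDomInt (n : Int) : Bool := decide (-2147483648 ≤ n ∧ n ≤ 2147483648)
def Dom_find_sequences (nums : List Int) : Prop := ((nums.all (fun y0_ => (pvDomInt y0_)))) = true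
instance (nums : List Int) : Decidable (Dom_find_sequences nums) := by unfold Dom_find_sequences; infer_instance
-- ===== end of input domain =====

-- B replaces A's prev-tracking loop with sentinel 'None' slots and patch-last steps by
-- stack consumption with nested pop loops that emit complete [start, end] runs (objective:
-- simpler). Both A and B sort nums in place; the equivalence proved is about the return value.

-- ===== PORT A =====
-- sequences[-1][1] = v on the in-progress list of [start, None-or-end] pairs
def pvSetLast (xs : List (Int × Option Int)) (v : Int) : List (Int × Option Int) :=
  match xs with
  | [] => []
  | [x] => [(x.1, some v)]
  | x :: rest => x :: pvSetLast rest v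

def find_sequences (nums : List Int) : List (List Int) :=
  let sortedNums := PySem.List.sorted nums (fun x => x) false   -- nums.sort() (in-place; return value modeled)
  match sortedNums with
  | [] => []   -- Python raises IndexError reading the first element here; excluded by Pre_find_sequences
  | prev0 :: rest =>
    -- for n in nums[1:], state = (sequences, prev); [x, None] modeled as (x, none)
    let st := rest.foldl
      (fun (st : List (Int × Option Int) × Int) n =>
        let seqs := if n > st.2 + 1 then pvSetLast st.1 st.2 ++ [(n, none)] else st.1
        (seqs, n))
      ([(prev0, none)], prev0)
    -- sequences[-1][1] = nums[-1]; every slot is filled, so getD 0 never surfaces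
    let seqs := pvSetLast st.1 ((sortedNums.getLast?).getD 0)
    seqs.map (fun p => [p.1, p.2.getD 0])

-- ===== PORT B =====
-- Python's stack is nums[::-1] popped from the END; modeled exactly as front-to-back
-- recursion over the sorted list (pop() = head, stack[-1] = head of the remainder).
-- inner loop: while stack and stack[-1] <= prev + 1: prev = stack.pop()
def pvScanRun (prev : Int) (stack : List Int) : Int × List Int :=
  match stack with
  | [] => (prev, [])
  | n :: t => if n ≤ prev + 1 then pvScanRun n t else (prev, n :: t)

theorem pvScanRun_length_le (prev : Int) (stack : List Int) :
    (pvScanRun prev stack).2.length ≤ stack.length := by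
  induction stack generalizing prev with
  | nil => simp [pvScanRun]
  | cons n t ih =>
    simp only [pvScanRun]
    split
    · exact Nat.le_trans (ih n) (Nat.le_succ _)
    · simp

-- outer loop: while stack: … out.append([first, prev])
def pvRuns : List Int → List (List Int)
  | [] => []
  | x :: rest =>
    let r := pvScanRun x rest
    [x, r.1] :: pvRuns r.2
termination_by xs => xs.length
decreasing_by
  simpa using Nat.lt_succ_of_le (pvScanRun_length_le x rest)

def find_sequences_alt (nums : List Int) : List (List Int) :=
  pvRuns (PySem.List.sorted nums (fun x => x) false)

-- ===== PRECONDITION & SPEC =====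
-- Pre_ excludes exactly the empty list, on which A raises IndexError reading the first element.
def Pre_find_sequences (nums : List Int) : Prop := nums ≠ []
instance (nums : List Int) : Decidable (Pre_find_sequences nums) := by
  unfold Pre_find_sequences; infer_instance

def pvWitness_find_sequences : List Int := [4, 1, 2, 9]

-- On the empty list A raises IndexError while B returns [].
def Raises_find_sequences (nums : List Int) : Prop := nums = []
instance (nums : List Int) : Decidable (Raises_find_sequences nums) := by
  unfold Raises_find_sequences; infer_instance
def pvRaiseWitness_find_sequences : List Int := []
def pvRaiseWitnessOut_find_sequences : List (List Int) := []

def Spec_find_sequences (nums : List Int) (out : List (List Int)) : Prop := out = find_sequences_alt nums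
instance (nums : List Int) (out : List (List Int)) : Decidable (Spec_find_sequences nums out) := by unfold Spec_find_sequences; infer_instance

-- ===== CLAIM (what is proved, stated in full; the proofs are below) =====
def Claim_equal_find_sequences : Prop := ∀ (nums : List Int), Dom_find_sequences nums → Pre_find_sequences nums → Spec_find_sequences nums (find_sequences nums)
def Claim_raises_find_sequences : Prop := (∀ (nums : List Int), Dom_find_sequences nums → Raises_find_sequences nums → ¬ Pre_find_sequences nums) ∧ (Dom_find_sequences (pvRaiseWitness_find_sequences) ∧ Raises_find_sequences (pvRaiseWitness_find_sequences) ∧ find_sequences_alt (pvRaiseWitness_find_sequences) = pvRaiseWitnessOut_find_sequences)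

-- ===== LEMMAS AND PROOFS =====

-- canonical description of A's loop result: runs of (start, end) pairs; the final
-- write sequences[-1][1] = w is folded in as the closing value of the last run
def pvAuxW (cur prev : Int) (xs : List Int) (w : Int) : List (Int × Int) :=
  match xs with
  | [] => [(cur, w)]
  | n :: t => if n > prev + 1 then (cur, prev) :: pvAuxW n n t w else pvAuxW cur n t w

theorem pvSetLast_append_single (l : List (Int × Option Int)) (x : Int × Option Int) (v : Int) :
    pvSetLast (l ++ [x]) v = l ++ [(x.1, some v)] := by
  induction l with
  | nil => simp [pvSetLast]
  | cons a t ih =>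
    cases t with
    | nil => simp [pvSetLast]
    | cons b u => simpa [pvSetLast] using ih

-- the fold invariant for A: finished pairs accumulate in front of the open (cur, none) slot
theorem pvFold_eq_auxW (rest : List Int) (done : List (Int × Option Int))
    (cur prev w : Int) :
    pvSetLast ((rest.foldl
      (fun (st : List (Int × Option Int) × Int) n =>
        let seqs := if n > st.2 + 1 then pvSetLast st.1 st.2 ++ [(n, none)] else st.1
        (seqs, n))
      (done ++ [(cur, none)], prev)).1) w
    = done ++ (pvAuxW cur prev rest w).map (fun p => (p.1, some p.2)) := by
  induction rest generalizing done cur prev with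
  | nil => simp [pvAuxW, pvSetLast_append_single]
  | cons n t ih =>
    by_cases h : n > prev + 1
    · have := ih (done ++ [(cur, some prev)]) n n
      simp only [List.foldl_cons, h, pvSetLast_append_single, pvAuxW] at *
      simpa [List.append_assoc] using this
    · have := ih done cur n
      simp only [List.foldl_cons, pvAuxW, h] at *
      simpa using this

-- last element of prev :: rest, as A's nums[-1] read computes it
def pvLastOf (prev : Int) : List Int → Int
  | [] => prev
  | n :: t => pvLastOf n t

theorem pvGetLast_eq_lastOf (prev : Int) (rest : List Int) :
    ((prev :: rest).getLast?).getD 0 = pvLastOf prev rest := by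
  induction rest generalizing prev with
  | nil => simp [pvLastOf]
  | cons n t ih => simpa [List.getLast?_cons_cons, pvLastOf] using ih n

-- on a sorted tail, A's canonical runs are exactly B's stack runs
theorem pvAuxW_eq_runs (rest : List Int) (cur prev : Int)
    (hs : (prev :: rest).Pairwise (· ≤ ·)) :
    (pvAuxW cur prev rest (pvLastOf prev rest)).map (fun p => [p.1, p.2])
      = [cur, (pvScanRun prev rest).1] :: pvRuns (pvScanRun prev rest).2 := by
  induction rest generalizing cur prev with
  | nil => simp [pvAuxW, pvScanRun, pvLastOf, pvRuns]
  | cons n t ih =>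
    have hs' : (n :: t).Pairwise (· ≤ ·) := hs.tail
    by_cases h : n > prev + 1
    · have hn : ¬ n ≤ prev + 1 := by omega
      have := ih n n hs'
      simp only [pvAuxW, if_pos h, pvScanRun, if_neg hn, pvLastOf, List.map_cons, this]
      simp [pvRuns]
    · have hn : n ≤ prev + 1 := by omega
      have := ih cur n hs'
      simp only [pvAuxW, if_neg h, pvScanRun, if_pos hn, pvLastOf]
      exact this

-- ===== VERDICT (by name: the statement is the Claim_ definition above) =====
theorem find_sequences_spec : Claim_equal_find_sequences := by
  intro nums _ hpre
  unfold Spec_find_sequences find_sequences find_sequences_alt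
  have hne : PySem.List.sorted nums (fun x => x) false ≠ [] := by
    simpa [PySem.List.sorted_eq_nil_iff] using hpre
  obtain ⟨p, rest, hcons⟩ := List.exists_cons_of_ne_nil hne
  have hsorted : (p :: rest).Pairwise (· ≤ ·) := by
    have := PySem.List.sorted_pairwise (xs := nums) (key := fun x => x)
    rw [hcons] at this; exact this
  simp only [hcons]
  have h1 := pvFold_eq_auxW rest [] p p (((p :: rest).getLast?).getD 0)
  simp only [List.nil_append] at h1
  rw [h1, pvGetLast_eq_lastOf]
  have h2 := pvAuxW_eq_runs rest p p hsorted
  rw [List.map_map]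
  have : ((fun p : Int × Option Int => [p.1, p.2.getD 0]) ∘ fun p : Int × Int => (p.1, some p.2))
      = fun p : Int × Int => [p.1, p.2] := by funext q; simp
  rw [this, h2]
  conv_rhs => rw [pvRuns]

@[simp] theorem find_sequences_raises : Claim_raises_find_sequences := by
  unfold Claim_raises_find_sequences
  refine ⟨fun nums _ h => by simp [Raises_find_sequences, Pre_find_sequences] at *; exact h,
    by decide, by decide, ?_⟩
  show find_sequences_alt [] = []
  have : PySem.List.sorted ([] : List Int) (fun x => x) false = [] :=
    by simp [PySem.List.sorted_eq_nil_iff]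
  simp [find_sequences_alt, this, pvRuns]
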